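-- pv_equiv track=rewrite | github.com/denis-sukhoverkhov/kb | python/largest_continuous_sequence_zero_sum.py | lszero
-- ===== SOURCE A (Python) =====
-- def lszero(A):
--     hm = {}
--
--     sum = 0
--     res = []
--     for i in range(len(A)):
--         sum += A[i]
--
--         if sum == 0:
--             res.append(A[:i + 1])
--
--         if sum in hm:
--             res.append(A[hm[sum] + 1:i + 1])
--         else:
--             hm[sum] = i
--
--     new_res = sorted(res, key=lambda i: len(i), reverse=True)
--
--     return new_res[0] if new_res else []
-- ===== SOURCE B (Python) =====
-- def lszero(A):
--     # One pass: prefix-sum first-occurrence map; track first longest window; slice once.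
--     first = {0: -1}
--     s = 0
--     best_len = 0
--     best_end = -1
--     for i, x in enumerate(A):
--         s += x
--         j = first.get(s)
--         if j is None:
--             first[s] = i
--         elif i - j > best_len:
--             best_len = i - j
--             best_end = i
--     return A[best_end - best_len + 1 : best_end + 1]
-- ===== Notes on version B (the rewrite author's own statement) =====
-- stated objective: alternative
-- what changed: Instead of materialising every zero-sum slice and stable-sorting them all by length, B keeps a prefix-sum first-occurrence hashmap with a {0:-1} sentinel, tracks the first longest window's (length,end) in one pass, and slices once at the end.
import Mathlib
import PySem

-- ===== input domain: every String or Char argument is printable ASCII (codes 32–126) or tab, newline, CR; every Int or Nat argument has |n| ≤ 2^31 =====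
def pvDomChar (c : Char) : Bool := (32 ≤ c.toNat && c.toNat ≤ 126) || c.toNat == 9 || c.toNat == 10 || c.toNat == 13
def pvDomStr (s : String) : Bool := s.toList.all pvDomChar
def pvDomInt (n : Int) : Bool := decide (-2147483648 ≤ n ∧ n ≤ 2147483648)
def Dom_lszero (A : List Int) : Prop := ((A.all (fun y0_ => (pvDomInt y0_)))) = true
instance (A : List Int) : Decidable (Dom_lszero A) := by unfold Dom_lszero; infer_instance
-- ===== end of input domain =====

-- B replaces A's collect-all-zero-sum-slices-then-stable-sort with a one-pass
-- prefix-sum first-occurrence map tracking the first longest window, slicing once at the end.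

-- ===== PORT A =====
-- loop body of A: sum += A[i]; zero-prefix append; hashmap membership check / append / store
def lszeroStep (A : List Int) (st : PySem.Dict Int Int × Int × List (List Int)) (i : Int) :
    PySem.Dict Int Int × Int × List (List Int) :=
  let sum := st.2.1 + PySem.List.pyGetD A i 0
  let res := if sum = 0 then st.2.2 ++ [PySem.List.slice A none (some (i + 1))] else st.2.2
  match st.1.get? sum with
  | some j => (st.1, sum, res ++ [PySem.List.slice A (some (j + 1)) (some (i + 1))])
  | none => (st.1.insert sum i, sum, res)

def lszero (A : List Int) : List Int :=
  let st := (PySem.List.pyRange 0 (A.length : Int) 1).foldl (lszeroStep A)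
      ((PySem.Dict.empty : PySem.Dict Int Int), 0, [])
  match PySem.List.sorted st.2.2 (fun l => l.length) true with
  | [] => []
  | h :: _ => h

-- ===== PORT B =====
-- loop body of B: s += x; j = first.get(s); store first occurrence or update the best window
def lszeroAltStep (st : PySem.Dict Int Int × Int × Int × Int) (p : Int × Int) :
    PySem.Dict Int Int × Int × Int × Int :=
  let s := st.2.1 + p.2
  match st.1.get? s with
  | none => (st.1.insert s p.1, s, st.2.2.1, st.2.2.2)
  | some j =>
      if st.2.2.1 < p.1 - j then (st.1, s, p.1 - j, p.1) else (st.1, s, st.2.2.1, st.2.2.2)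

def lszero_alt (A : List Int) : List Int :=
  let st := (PySem.List.enumerate A).foldl lszeroAltStep
      ((PySem.Dict.empty : PySem.Dict Int Int).insert 0 (-1), 0, 0, -1)
  PySem.List.slice A (some (st.2.2.2 - st.2.2.1 + 1)) (some (st.2.2.2 + 1))

-- ===== PRECONDITION & SPEC =====
def Spec_lszero (A : List Int) (out : List Int) : Prop := out = lszero_alt A
instance (A : List Int) (out : List Int) : Decidable (Spec_lszero A out) := by
  unfold Spec_lszero; infer_instance

-- ===== CLAIM (what is proved, stated in full; the proofs are below) =====
def Claim_equal_lszero : Prop := ∀ (A : List Int), Dom_lszero A → Spec_lszero A (lszero A)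

-- ===== LEMMAS AND PROOFS =====

-- "first element of maximal length" accumulator: what the head of A's stable
-- descending sort computes, folded over the append order of res
def fmStep (b : Option (List Int)) (x : List Int) : Option (List Int) :=
  match b with
  | none => some x
  | some m => if m.length < x.length then some x else some m

theorem head?_insertBy {α : Type} (before : α → α → Bool) (x : α) (ys : List α) :
    (PySem.List.insertBy before x ys).head? =
      some (match ys with | [] => x | y :: _ => if before x y then x else y) := by
  cases ys with
  | nil => simp [PySem.List.insertBy]
  | cons y t => by_cases h : before x y <;> simp [PySem.List.insertBy, h]

theorem head?_foldl_insertBy {α : Type} (before : α → α → Bool) :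
    ∀ (xs : List α) (acc : List α),
      (xs.foldl (fun acc x => PySem.List.insertBy before x acc) acc).head? =
        xs.foldl
          (fun b x => some (match b with | none => x | some m => if before x m then x else m))
          acc.head? := by
  intro xs
  induction xs with
  | nil => intro acc; simp
  | cons x t ih =>
      intro acc
      simp only [List.foldl_cons]
      rw [ih, head?_insertBy]
      cases acc <;> simp

theorem sorted_head_fm (res : List (List Int)) :
    (PySem.List.sorted res (fun l => l.length) true).head? = res.foldl fmStep none := by
  rw [PySem.List.sorted_rev_eq_foldl_insertBy, head?_foldl_insertBy]
  simp only [List.head?_nil]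
  congr 1
  funext b x
  cases b with
  | none => rfl
  | some m => by_cases h : m.length < x.length <;> simp [fmStep, h]

theorem length_slice_of (A : List Int) (a b : Int) (h0 : 0 ≤ a) (hab : a ≤ b)
    (hb : b ≤ (A.length : Int)) :
    ((PySem.List.slice A (some a) (some b)).length : Int) = b - a := by
  rw [PySem.List.slice_toNat A h0 (le_trans h0 hab)]
  simp
  omega

-- appending a candidate to res updates the running first-maximum exactly like B's comparison
theorem fm_update (res : List (List Int)) (M cand : List Int) (bl cl : Int)
    (hfold : res.foldl fmStep none = if bl = 0 then none else some M)
    (hM : bl ≠ 0 → (M.length : Int) = bl)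
    (hc : (cand.length : Int) = cl) (hcl : 0 < cl) :
    (res ++ [cand]).foldl fmStep none = if bl < cl then some cand else some M := by
  simp only [List.foldl_append, List.foldl_cons, List.foldl_nil, hfold]
  by_cases hbl : bl = 0
  · simp only [if_pos hbl, fmStep]
    rw [if_pos (by omega)]
  · have hMl := hM hbl
    simp only [if_neg hbl, fmStep]
    by_cases hlt : bl < cl
    · rw [if_pos (by omega), if_pos hlt]
    · rw [if_neg (by omega), if_neg hlt]

-- appending a candidate no longer than the current maximum leaves it unchanged
theorem fm_noop (res : List (List Int)) (M cand : List Int)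
    (hfold : res.foldl fmStep none = some M) (hle : cand.length ≤ M.length) :
    (res ++ [cand]).foldl fmStep none = some M := by
  simp only [List.foldl_append, List.foldl_cons, List.foldl_nil, hfold, fmStep]
  rw [if_neg (by omega)]

-- joint loop invariant after the first pre.length iterations
def InvAB (A pre : List Int) (stA : PySem.Dict Int Int × Int × List (List Int))
    (stB : PySem.Dict Int Int × Int × Int × Int) : Prop :=
  stA.2.1 = pre.sum ∧ stB.2.1 = pre.sum ∧
  (∀ s : Int, s ≠ 0 → stA.1.get? s = stB.1.get? s) ∧
  stB.1.get? 0 = some (-1) ∧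
  (∀ s j, stA.1.get? s = some j → 0 ≤ j ∧ j < (pre.length : Int)) ∧
  stA.2.2.foldl fmStep none =
    (if stB.2.2.1 = 0 then none
     else some (PySem.List.slice A (some (stB.2.2.2 - stB.2.2.1 + 1)) (some (stB.2.2.2 + 1)))) ∧
  0 ≤ stB.2.2.1 ∧ (stB.2.2.1 = 0 → stB.2.2.2 = -1) ∧
  (0 < stB.2.2.1 → stB.2.2.1 ≤ stB.2.2.2 + 1 ∧ stB.2.2.2 < (pre.length : Int))

theorem inv_step (A pre rest : List Int) (x : Int) (hA : A = pre ++ x :: rest)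
    (stA : PySem.Dict Int Int × Int × List (List Int))
    (stB : PySem.Dict Int Int × Int × Int × Int) (h : InvAB A pre stA stB) :
    InvAB A (pre ++ [x]) (lszeroStep A stA (pre.length : Int))
      (lszeroAltStep stB ((pre.length : Int), x)) := by
  obtain ⟨hmA, sA, res⟩ := stA
  obtain ⟨hmB, sB, bl, be⟩ := stB
  unfold InvAB at h
  obtain ⟨h1, h2, h3, h4, h5, h6, h7, h8, h9⟩ := h
  dsimp only at h1 h2 h3 h4 h5 h6 h7 h8 h9
  subst h1
  subst h2
  have hx : PySem.List.pyGetD A (pre.length : Int) 0 = x := by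
    rw [hA]; simp [PySem.List.pyGetD_natCast, List.getD]
  have hpreA : ((pre.length : Int)) + 1 ≤ (A.length : Int) := by
    rw [hA]; simp
  have hl1 : (((pre ++ [x]).length : Nat) : Int) = (pre.length : Int) + 1 := by
    push_cast; simp
  have hi0 : (0 : Int) ≤ (pre.length : Int) := Int.natCast_nonneg _
  have hMlen : bl ≠ 0 →
      (((PySem.List.slice A (some (be - bl + 1)) (some (be + 1))).length : Int) = bl) := by
    intro hbl
    obtain ⟨hb1, hb2⟩ := h9 (by omega)
    have := length_slice_of A (be - bl + 1) (be + 1) (by omega) (by omega) (by omega)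
    omega
  have hPlen : ((PySem.List.slice A none (some ((pre.length : Int) + 1))).length : Int)
      = (pre.length : Int) + 1 := by
    rw [PySem.List.slice_to A (by omega)]
    simp
    omega
  have hQlen : ∀ j : Int, 0 ≤ j → j < (pre.length : Int) →
      ((PySem.List.slice A (some (j + 1)) (some ((pre.length : Int) + 1))).length : Int)
        = (pre.length : Int) - j := by
    intro j hj hji
    have := length_slice_of A (j + 1) ((pre.length : Int) + 1) (by omega) (by omega) (by omega)
    omega
  simp only [lszeroStep, lszeroAltStep]
  rw [hx]
  by_cases hs0 : pre.sum + x = 0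
  · -- the running sum is zero: A appends the whole prefix; B always finds 0 → -1
    rw [if_pos hs0]
    have hB0 : hmB.get? (pre.sum + x) = some (-1) := by rw [hs0]; exact h4
    rw [hB0]
    dsimp only
    have hm1 : (pre.length : Int) - (-1) = (pre.length : Int) + 1 := by ring
    rw [hm1]
    have hup := fm_update res (PySem.List.slice A (some (be - bl + 1)) (some (be + 1)))
      (PySem.List.slice A none (some ((pre.length : Int) + 1))) bl ((pre.length : Int) + 1)
      h6 hMlen hPlen (by omega)
    have he0 : (pre.length : Int) - ((pre.length : Int) + 1) + 1 = 0 := by ring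
    cases hgA : hmA.get? (pre.sum + x) with
    | none =>
        dsimp only
        by_cases hcmp : bl < (pre.length : Int) + 1
        · rw [if_pos hcmp]
          unfold InvAB
          dsimp only
          refine ⟨by simp, by simp, ?_, h4, ?_, ?_, by omega, by omega, ?_⟩
          · intro s hs
            rw [PySem.Dict.get?_insert,
              if_neg (show ¬(s = pre.sum + x) from fun hc => hs (by omega))]
            exact h3 s hs
          · intro s j hj
            rw [PySem.Dict.get?_insert] at hj
            by_cases hc : s = pre.sum + x
            · rw [if_pos hc] at hj
              have : ((pre.length : Nat) : Int) = j := by injection hj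
              omega
            · rw [if_neg hc] at hj
              have := h5 s j hj
              omega
          · rw [hup, if_pos hcmp, if_neg (by omega), he0, PySem.List.slice_zero_start]
          · rw [hl1]; omega
        · rw [if_neg hcmp]
          unfold InvAB
          dsimp only
          refine ⟨by simp, by simp, ?_, h4, ?_, ?_, h7, by omega, ?_⟩
          · intro s hs
            rw [PySem.Dict.get?_insert,
              if_neg (show ¬(s = pre.sum + x) from fun hc => hs (by omega))]
            exact h3 s hs
          · intro s j hj
            rw [PySem.Dict.get?_insert] at hj
            by_cases hc : s = pre.sum + x
            · rw [if_pos hc] at hj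
              have : ((pre.length : Nat) : Int) = j := by injection hj
              omega
            · rw [if_neg hc] at hj
              have := h5 s j hj
              omega
          · rw [hup, if_neg hcmp, if_neg (by omega)]
          · have := h9 (by omega)
            rw [hl1]; omega
    | some j0 =>
        dsimp only
        obtain ⟨hj0a, hj0b⟩ := h5 (pre.sum + x) j0 hgA
        have hQ := hQlen j0 hj0a hj0b
        by_cases hcmp : bl < (pre.length : Int) + 1
        · rw [if_pos hcmp]
          unfold InvAB
          dsimp only
          refine ⟨by simp, by simp, h3, h4, ?_, ?_, by omega, by omega, ?_⟩
          · intro s j hj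
            have := h5 s j hj
            omega
          · rw [fm_noop (res ++ [PySem.List.slice A none (some ((pre.length : Int) + 1))])
              (PySem.List.slice A none (some ((pre.length : Int) + 1)))
              (PySem.List.slice A (some (j0 + 1)) (some ((pre.length : Int) + 1)))
              (by rw [hup, if_pos hcmp]) (by omega)]
            rw [if_neg (by omega), he0, PySem.List.slice_zero_start]
          · rw [hl1]; omega
        · rw [if_neg hcmp]
          unfold InvAB
          dsimp only
          refine ⟨by simp, by simp, h3, h4, ?_, ?_, h7, by omega, ?_⟩
          · intro s j hj
            have := h5 s j hj
            omega
          · have hMl := hMlen (by omega)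
            rw [fm_noop (res ++ [PySem.List.slice A none (some ((pre.length : Int) + 1))])
              (PySem.List.slice A (some (be - bl + 1)) (some (be + 1)))
              (PySem.List.slice A (some (j0 + 1)) (some ((pre.length : Int) + 1)))
              (by rw [hup, if_neg hcmp]) (by omega)]
            rw [if_neg (by omega)]
          · have := h9 (by omega)
            rw [hl1]; omega
  · -- nonzero running sum: the two hashmaps agree at this key
    rw [if_neg hs0]
    have hAB : hmA.get? (pre.sum + x) = hmB.get? (pre.sum + x) := h3 _ hs0
    cases hgB : hmB.get? (pre.sum + x) with
    | none =>
        have hgA : hmA.get? (pre.sum + x) = none := by rw [hAB, hgB]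
        rw [hgA]
        dsimp only
        unfold InvAB
        dsimp only
        refine ⟨by simp, by simp, ?_, ?_, ?_, h6, h7, h8, ?_⟩
        · intro s hs
          rw [PySem.Dict.get?_insert, PySem.Dict.get?_insert]
          by_cases hc : s = pre.sum + x
          · rw [if_pos hc, if_pos hc]
          · rw [if_neg hc, if_neg hc]
            exact h3 s hs
        · rw [PySem.Dict.get?_insert,
            if_neg (show ¬((0:Int) = pre.sum + x) from fun hc => hs0 (by omega))]
          exact h4
        · intro s j hj
          rw [PySem.Dict.get?_insert] at hj
          by_cases hc : s = pre.sum + x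
          · rw [if_pos hc] at hj
            have : ((pre.length : Nat) : Int) = j := by injection hj
            omega
          · rw [if_neg hc] at hj
            have := h5 s j hj
            omega
        · intro h'
          have := h9 h'
          rw [hl1]; omega
    | some j =>
        have hgA : hmA.get? (pre.sum + x) = some j := by rw [hAB, hgB]
        rw [hgA]
        dsimp only
        obtain ⟨hja, hjb⟩ := h5 (pre.sum + x) j hgA
        have hQ := hQlen j hja hjb
        have hup := fm_update res (PySem.List.slice A (some (be - bl + 1)) (some (be + 1)))
          (PySem.List.slice A (some (j + 1)) (some ((pre.length : Int) + 1))) bl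
          ((pre.length : Int) - j) h6 hMlen hQ (by omega)
        by_cases hcmp : bl < (pre.length : Int) - j
        · rw [if_pos hcmp]
          unfold InvAB
          dsimp only
          refine ⟨by simp, by simp, h3, h4, ?_, ?_, by omega, by omega, ?_⟩
          · intro s j' hj'
            have := h5 s j' hj'
            omega
          · rw [hup, if_pos hcmp, if_neg (by omega)]
            have he : (pre.length : Int) - ((pre.length : Int) - j) + 1 = j + 1 := by ring
            rw [he]
          · rw [hl1]; omega
        · rw [if_neg hcmp]
          unfold InvAB
          dsimp only
          refine ⟨by simp, by simp, h3, h4, ?_, ?_, h7, by omega, ?_⟩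
          · intro s j' hj'
            have := h5 s j' hj'
            omega
          · rw [hup, if_neg hcmp, if_neg (by omega)]
          · have := h9 (by omega)
            rw [hl1]; omega

theorem inv_loop (A : List Int) : ∀ (rest pre : List Int)
    (stA : PySem.Dict Int Int × Int × List (List Int))
    (stB : PySem.Dict Int Int × Int × Int × Int),
    A = pre ++ rest → InvAB A pre stA stB →
    InvAB A A ((PySem.List.pyRange (pre.length : Int) (A.length : Int) 1).foldl (lszeroStep A) stA)
      ((PySem.List.enumerate rest (pre.length : Int)).foldl lszeroAltStep stB) := by
  intro rest
  induction rest with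
  | nil =>
      intro pre stA stB hA h
      have hlen : (A.length : Int) ≤ (pre.length : Int) := by rw [hA]; simp
      rw [PySem.List.pyRange_one_eq_nil hlen]
      have hpre : pre = A := by rw [hA]; simp
      simpa [PySem.List.enumerate, hpre] using h
  | cons x rs ih =>
      intro pre stA stB hA h
      have hlt : (pre.length : Int) < (A.length : Int) := by
        rw [hA]; simp
      rw [PySem.List.pyRange_one_cons hlt, PySem.List.enumerate_cons]
      simp only [List.foldl_cons]
      have h' := inv_step A pre rs x hA stA stB h
      have hA' : A = (pre ++ [x]) ++ rs := by rw [hA]; simp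
      have := ih (pre ++ [x]) (lszeroStep A stA (pre.length : Int))
        (lszeroAltStep stB ((pre.length : Int), x)) hA' h'
      have hc : ((pre ++ [x]).length : Int) = (pre.length : Int) + 1 := by
        simp
      rw [hc] at this
      exact this

-- ===== VERDICT (by name: the statement is the Claim_ definition above) =====
theorem lszero_spec : Claim_equal_lszero := by
  intro A _
  unfold Spec_lszero
  have hbase : InvAB A [] ((PySem.Dict.empty : PySem.Dict Int Int), 0, ([] : List (List Int)))
      ((PySem.Dict.empty : PySem.Dict Int Int).insert 0 (-1), 0, 0, -1) := by
    refine ⟨by simp, by simp, ?_, ?_, ?_, by simp, by norm_num, fun _ => rfl, by norm_num⟩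
    · intro s hs; simp [PySem.Dict.get?_empty, PySem.Dict.get?_insert, hs]
    · simp
    · intro s j hj; simp [PySem.Dict.get?_empty] at hj
  have hinv := inv_loop A A []
    ((PySem.Dict.empty : PySem.Dict Int Int), 0, ([] : List (List Int)))
    ((PySem.Dict.empty : PySem.Dict Int Int).insert 0 (-1), 0, 0, -1) (by simp) hbase
  simp only [List.length_nil, Nat.cast_zero] at hinv
  simp only [lszero, lszero_alt]
  obtain ⟨-, -, -, -, -, h6, h7, h8, h9⟩ := hinv
  set stA := (PySem.List.pyRange 0 (A.length : Int) 1).foldl (lszeroStep A)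
      ((PySem.Dict.empty : PySem.Dict Int Int), 0, ([] : List (List Int))) with hstA
  set stB := (PySem.List.enumerate A 0).foldl lszeroAltStep
      ((PySem.Dict.empty : PySem.Dict Int Int).insert 0 (-1), 0, 0, -1) with hstB
  by_cases hbl : stB.2.2.1 = 0
  · have hnil : (PySem.List.sorted stA.2.2 (fun l => l.length) true).head? = none := by
      rw [sorted_head_fm, h6]; simp [hbl]
    rw [List.head?_eq_none_iff] at hnil
    rw [hnil]
    have hbe := h8 hbl
    rw [hbe, hbl]
    norm_num
    rw [PySem.List.slice_to A le_rfl]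
    simp
  · have hsome : (PySem.List.sorted stA.2.2 (fun l => l.length) true).head? =
        some (PySem.List.slice A (some (stB.2.2.2 - stB.2.2.1 + 1)) (some (stB.2.2.2 + 1))) := by
      rw [sorted_head_fm, h6]; simp [hbl]
    cases hs : PySem.List.sorted stA.2.2 (fun l => l.length) true with
    | nil => rw [hs] at hsome; simp at hsome
    | cons hd tl =>
        rw [hs] at hsome
        simp at hsome
        exact hsome
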